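-- pv_equiv track=rewrite | github.com/Lyle-Kottke/520-Exercise-2 | problem6/solutions/solution1.py | solve
-- ===== SOURCE A (Python) =====
-- def solve(n: int, m: int, grid: list[str]) -> str:
--     """
--     Checks if an n x m grid of 'R', 'G', 'B' represents a correct flag of Berland.
--
--     The flag must consist of three equal-width and equal-height stripes, parallel
--     to the sides, with each of the three colors ('R', 'G', 'B') used exactly once.
--
--     :param n: The number of rows (height of the grid).
--     :param m: The number of columns (width of the grid).
--     :param grid: A list of strings representing the grid.
--     :return: "YES" if the grid is a valid flag, "NO" otherwise.
--
--     Examples: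
--     >>> check_berland_flag(6, 5, ["RRRRR", "RRRRR", "BBBBB", "BBBBB", "GGGGG", "GGGGG"])
--     'YES'
--     >>> check_berland_flag(4, 3, ["BRG", "BRG", "BRG", "BRG"])
--     'YES'
--     >>> check_berland_flag(6, 7, ["RRRGGGG", "RRRGGGG", "RRRGGGG", "RRRBBBB", "RRRBBBB", "RRRBBBB"])
--     'NO'
--     >>> check_berland_flag(4, 4, ["RRRR", "RRRR", "BBBB", "GGGG"])
--     'NO'
--     """
--
--     # Helper function to check if a sub-rectangle is monochromatic
--     def is_monochromatic(r_start, r_end, c_start, c_end):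
--         """Checks if the sub-grid from [r_start, c_start] to [r_end-1, c_end-1]
--         is composed of a single color. Returns the color, or None if not monochromatic."""
--         if r_start >= r_end or c_start >= c_end:
--             return None # Should not happen with correct stripe definitions
--
--         color = grid[r_start][c_start]
--         for r in range(r_start, r_end):
--             for c in range(c_start, c_end):
--                 if grid[r][c] != color:
--                     return None
--         return color
--
--     # --- 1. Check for Horizontal Stripes ---
--     if n % 3 == 0:
--         h = n // 3
--
--         # Define stripe boundaries
--         stripes = [
--             (0, h, 0, m),      # Stripe 1: Rows 0 to h-1
--             (h, 2 * h, 0, m),  # Stripe 2: Rows h to 2h-1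
--             (2 * h, n, 0, m)   # Stripe 3: Rows 2h to n-1
--         ]
--
--         colors = []
--         is_valid_horizontal = True
--         for r_start, r_end, c_start, c_end in stripes:
--             color = is_monochromatic(r_start, r_end, c_start, c_end)
--             if color is None:
--                 is_valid_horizontal = False
--                 break
--             colors.append(color)
--
--         if is_valid_horizontal:
--             # Check for distinct colors and that all three 'R', 'G', 'B' are present (implicitly)
--             # Since the problem constraints only use R, G, B, checking for distinctness is enough.
--             if len(set(colors)) == 3:
--                 return "YES"
--
--     # --- 2. Check for Vertical Stripes ---
--     if m % 3 == 0:
--         w = m // 3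
--
--         # Define stripe boundaries
--         stripes = [
--             (0, n, 0, w),      # Stripe 1: Cols 0 to w-1
--             (0, n, w, 2 * w),  # Stripe 2: Cols w to 2w-1
--             (0, n, 2 * w, m)   # Stripe 3: Cols 2w to m-1
--         ]
--
--         colors = []
--         is_valid_vertical = True
--         for r_start, r_end, c_start, c_end in stripes:
--             color = is_monochromatic(r_start, r_end, c_start, c_end)
--             if color is None:
--                 is_valid_vertical = False
--                 break
--             colors.append(color)
--
--         if is_valid_vertical:
--             # Check for distinct colors
--             if len(set(colors)) == 3:
--                 return "YES"
--
--     # --- 3. Final Output ---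
--     return "NO"
-- ===== SOURCE B (Python) =====
-- def solve(n: int, m: int, grid: list[str]) -> str:
--     def line_colors(lines):
--         # map each line to its single color; None if some line is not uniform (or empty)
--         colors = []
--         for line in lines:
--             if len(set(line)) != 1:
--                 return None
--             colors.append(line[0])
--         return colors
--
--     def striped(colors):
--         # colors splits into three equal constant blocks with pairwise-distinct colors
--         if colors is None or len(colors) == 0 or len(colors) % 3 != 0:
--             return False
--         k = len(colors) // 3
--         blocks = [colors[i * k:(i + 1) * k] for i in range(3)]
--         reps = [b[0] for b in blocks]
--         return all(all(c == b[0] for c in b) for b in blocks) and len(set(reps)) == 3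
--
--     if n % 3 == 0 and striped(line_colors(grid)):
--         return "YES"
--     if m % 3 == 0:
--         cols = [''.join(row[j] for row in grid) for j in range(m)]
--         if striped(line_colors(cols)):
--             return "YES"
--     return "NO"
-- ===== Notes on version B (the rewrite author's own statement) =====
-- stated objective: simpler
-- what changed: B reduces each row (and, for the vertical orientation, each column) to its single color when internally uniform, then checks that this 1-D color list splits into three equal, constant, pairwise-distinct blocks, replacing A's nested row-by-column scans over six stripe rectangles.
-- outside the precondition, e.g. on solve(3, 1, ['R', 'G', 'B', 'R']): A returns 'YES', B returns 'NO'; on solve(0, 3, ['R', 'G', 'B']): A returns 'NO', B returns 'YES'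
import Mathlib
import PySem

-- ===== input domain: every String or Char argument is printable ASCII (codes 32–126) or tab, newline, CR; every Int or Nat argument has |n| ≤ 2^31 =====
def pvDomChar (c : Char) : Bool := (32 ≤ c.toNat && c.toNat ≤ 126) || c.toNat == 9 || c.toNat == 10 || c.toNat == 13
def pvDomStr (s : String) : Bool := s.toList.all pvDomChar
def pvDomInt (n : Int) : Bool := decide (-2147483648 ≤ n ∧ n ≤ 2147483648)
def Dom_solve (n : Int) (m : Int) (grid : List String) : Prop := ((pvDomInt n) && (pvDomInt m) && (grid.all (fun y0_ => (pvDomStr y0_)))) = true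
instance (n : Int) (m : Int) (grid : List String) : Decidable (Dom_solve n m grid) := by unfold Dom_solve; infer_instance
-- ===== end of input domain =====

-- B maps each row (resp. column) to its single color when uniform and checks that the resulting 1-D
-- color list splits into three equal, constant, pairwise-distinct blocks, instead of A's nested 2-D
-- rectangle scans over six stripe rectangles; objective: simpler. Equivalence is proved on consistent
-- grids (len(grid) = n, every row of length m).

-- ===== PORT A =====
def pvCharAt (grid : List String) (r c : Int) : Char :=
  match PySem.List.pyGet? grid r with
  | some row => (PySem.Str.pyGet? row c).getD '?'
  | none => '?'

def pvIsMono (grid : List String) (r0 r1 c0 c1 : Int) : Option Char :=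
  if r0 ≥ r1 ∨ c0 ≥ c1 then none
  else
    let color := pvCharAt grid r0 c0
    if (PySem.List.pyRange r0 r1 1).all (fun r =>
         (PySem.List.pyRange c0 c1 1).all (fun c => pvCharAt grid r c == color))
    then some color else none

def pvCollect (grid : List String) : List (Int × Int × Int × Int) → Option (List Char)
  | [] => some []
  | (r0, r1, c0, c1) :: rest =>
    match pvIsMono grid r0 r1 c0 c1 with
    | none => none
    | some col => (pvCollect grid rest).map (fun cs => col :: cs)

def solve (n : Int) (m : Int) (grid : List String) : String :=
  let hOk : Bool :=
    if PySem.Int.mod n 3 = 0 then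
      let h := PySem.Int.floordiv n 3
      match pvCollect grid [(0, h, 0, m), (h, 2*h, 0, m), (2*h, n, 0, m)] with
      | some colors => (PySem.Set.ofList colors).length == 3
      | none => false
    else false
  if hOk then "YES"
  else
    let vOk : Bool :=
      if PySem.Int.mod m 3 = 0 then
        let w := PySem.Int.floordiv m 3
        match pvCollect grid [(0, n, 0, w), (0, n, w, 2*w), (0, n, 2*w, m)] with
      | some colors => (PySem.Set.ofList colors).length == 3
      | none => false
      else false
    if vOk then "YES" else "NO"

-- ===== PORT B =====
def pvLineColors : List (List Char) → Option (List Char)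
  | [] => some []
  | line :: rest =>
    if (PySem.Set.ofList line).length ≠ 1 then none
    else (pvLineColors rest).map (fun cs => (PySem.List.pyGet? line 0).getD '?' :: cs)

def pvStriped : Option (List Char) → Bool
  | none => false
  | some colors =>
    if colors.length = 0 ∨ PySem.Int.mod (colors.length : Int) 3 ≠ 0 then false
    else
      let k := PySem.Int.floordiv (colors.length : Int) 3
      let blocks := (PySem.List.pyRange 0 3 1).map
        (fun i => PySem.List.slice colors (some (i*k)) (some ((i+1)*k)))
      let reps := blocks.map (fun b => (PySem.List.pyGet? b 0).getD '?')
      (blocks.all fun b => b.all fun c => c == (PySem.List.pyGet? b 0).getD '?') &&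
        ((PySem.Set.ofList reps).length == 3)

def solve_alt (n : Int) (m : Int) (grid : List String) : String :=
  if PySem.Int.mod n 3 = 0 ∧ pvStriped (pvLineColors (grid.map String.toList)) = true then "YES"
  else if PySem.Int.mod m 3 = 0 then
    let cols := (PySem.List.pyRange 0 m 1).map
      (fun j => grid.map (fun row => (PySem.Str.pyGet? row j).getD '?'))
    if pvStriped (pvLineColors cols) then "YES" else "NO"
  else "NO"

-- ===== PRECONDITION & SPEC =====
-- Pre_ admits consistent inputs (the problem's natural domain: len(grid) == n and every row of
-- length m) and all inputs with n % 3 ≠ 0 and m % 3 ≠ 0 (where A indexes nothing); on other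
-- inconsistent dimensions A raises IndexError or reads only an n×m corner of the data, while B
-- reads the whole grid.
def Pre_solve (n : Int) (m : Int) (grid : List String) : Prop :=
  (((grid.length : Int) = n) ∧ ∀ s ∈ grid, PySem.Str.len s = m) ∨
    (PySem.Int.mod n 3 ≠ 0 ∧ PySem.Int.mod m 3 ≠ 0)
instance (n : Int) (m : Int) (grid : List String) : Decidable (Pre_solve n m grid) := by
  unfold Pre_solve; infer_instance

def pvWitness_solve : Int × Int × List String := (3, 3, ["RRR", "GGG", "BBB"])

def Spec_solve (n : Int) (m : Int) (grid : List String) (out : String) : Prop := out = solve_alt n m grid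
instance (n : Int) (m : Int) (grid : List String) (out : String) : Decidable (Spec_solve n m grid out) := by unfold Spec_solve; infer_instance

-- ===== CLAIM (what is proved, stated in full; the proofs are below) =====
def Claim_equal_solve : Prop := ∀ (n : Int) (m : Int) (grid : List String), Dom_solve n m grid → Pre_solve n m grid → Spec_solve n m grid (solve n m grid)

-- ===== LEMMAS AND PROOFS =====
def pvHd (lines : List (List Char)) (i : Nat) : Char := (lines.getD i []).headD '?'

def pvSC (lines : List (List Char)) (a b : Nat) (col : Char) : Prop :=
  ∀ i, a ≤ i → i < b → ∀ ch ∈ lines.getD i [], ch = col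

def pvCols (grid : List String) (P : Nat) : List (List Char) :=
  (PySem.List.pyRange 0 (P:Int) 1).map
    (fun j => grid.map (fun row => (PySem.Str.pyGet? row j).getD '?'))

theorem headD_mem (l : List Char) (h : l ≠ []) : l.headD '?' ∈ l := by
  cases l with
  | nil => simp at h
  | cons a t => simp

theorem set_len_one (l : List Char) :
    (PySem.Set.ofList l).length = 1 ↔ l ≠ [] ∧ ∀ ch ∈ l, ch = l.headD '?' := by
  constructor
  · intro h
    obtain ⟨a, ha⟩ := List.length_eq_one_iff.mp h
    have hmem : ∀ x : Char, x ∈ l ↔ x = a := by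
      intro x
      rw [← PySem.Set.mem_ofList l x, ha]; simp
    have hne : l ≠ [] := List.ne_nil_of_mem ((hmem a).mpr rfl)
    refine ⟨hne, ?_⟩
    have hh : l.headD '?' = a := (hmem _).mp (headD_mem l hne)
    intro ch hch; rw [hh]; exact (hmem ch).mp hch
  · rintro ⟨hne, hall⟩
    have hmem : ∀ x : Char, x ∈ PySem.Set.ofList l ↔ x = l.headD '?' := by
      intro x
      rw [PySem.Set.mem_ofList l x]
      constructor
      · exact hall x
      · intro hx; subst hx; exact headD_mem l hne
    have hnd := PySem.Set.nodup_ofList l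
    rcases hs : PySem.Set.ofList l with _ | ⟨b, t⟩
    · exfalso
      have := (hmem (l.headD '?')).mpr rfl
      rw [hs] at this; simp at this
    · rw [hs] at hmem hnd
      have hb : b = l.headD '?' := (hmem b).mp (by simp)
      have ht : t = [] := by
        cases t with
        | nil => rfl
        | cons c u =>
          exfalso
          have hc : c = l.headD '?' := (hmem c).mp (by simp)
          simp [hb, hc] at hnd
      simp [ht]

theorem pvGet0 (l : List Char) : (PySem.List.pyGet? l 0).getD '?' = l.headD '?' := by
  cases l <;> simp [PySem.List.pyGet?_zero]

theorem lineColors_eq (ls : List (List Char)) :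
    pvLineColors ls =
      if (∀ line ∈ ls, line ≠ [] ∧ ∀ ch ∈ line, ch = line.headD '?')
      then some (ls.map (fun l => l.headD '?')) else none := by
  induction ls with
  | nil => simp [pvLineColors]
  | cons line t ih =>
    rw [pvLineColors, ih, pvGet0]
    simp only [List.forall_mem_cons]
    by_cases h1 : line ≠ [] ∧ ∀ ch ∈ line, ch = line.headD '?'
    · rw [if_neg (by simpa [set_len_one] using h1)]
      by_cases h2 : ∀ l ∈ t, l ≠ [] ∧ ∀ ch ∈ l, ch = l.headD '?'
      · rw [if_pos h2, if_pos ⟨h1, h2⟩]; rfl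
      · rw [if_neg h2, if_neg (by tauto)]; rfl
    · rw [if_pos (by simpa [set_len_one] using h1), if_neg (by tauto)]

theorem allall_iff (g : Int → Int → Char) (lo1 hi1 lo2 hi2 : Int) (col : Char) :
    (((PySem.List.pyRange lo1 hi1 1).all fun x =>
       (PySem.List.pyRange lo2 hi2 1).all fun y => g x y == col) = true)
    ↔ ∀ x, lo1 ≤ x → x < hi1 → ∀ y, lo2 ≤ y → y < hi2 → g x y = col := by
  simp only [List.all_eq_true, PySem.List.mem_pyRange_one, beq_iff_eq, and_imp]

theorem intq_iff_SC (lines : List (List Char)) (P : Nat) (hlenP : ∀ l ∈ lines, l.length = P)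
    (a b : Nat) (hb : b ≤ lines.length) (g : Int → Int → Char)
    (compat : ∀ i j : Nat, i < lines.length → j < P → g ↑i ↑j = (lines.getD i []).getD j '?')
    (col : Char) :
    (∀ x, (a:Int) ≤ x → x < (b:Int) → ∀ y, (0:Int) ≤ y → y < (P:Int) → g x y = col)
    ↔ pvSC lines a b col := by
  constructor
  · intro h i hai hib ch hch
    have hi : i < lines.length := lt_of_lt_of_le hib hb
    have hgd : lines.getD i [] = lines[i] := List.getD_eq_getElem lines [] hi
    obtain ⟨j, hj, rfl⟩ := List.mem_iff_getElem.mp hch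
    have hjP : j < P := by
      have := hlenP (lines.getD i []) (by rw [hgd]; exact List.getElem_mem hi)
      omega
    have := h ↑i (by exact_mod_cast hai) (by exact_mod_cast hib) ↑j
      (by positivity) (by exact_mod_cast hjP)
    rw [compat i j hi hjP] at this
    rw [← this, List.getD_eq_getElem _ '?' (by omega)]
  · intro h x hx1 hx2 y hy1 hy2
    have hx0 : (0:Int) ≤ x := le_trans (by positivity) hx1
    obtain ⟨i, rfl⟩ : ∃ i : Nat, (i:Int) = x := ⟨x.toNat, Int.toNat_of_nonneg hx0⟩
    obtain ⟨j, rfl⟩ : ∃ j : Nat, (j:Int) = y := ⟨y.toNat, Int.toNat_of_nonneg hy1⟩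
    have hib : i < b := by exact_mod_cast hx2
    have hjP : j < P := by exact_mod_cast hy2
    have hi : i < lines.length := lt_of_lt_of_le hib hb
    have hlen : (lines.getD i []).length = P := by
      rw [List.getD_eq_getElem lines [] hi]
      exact hlenP _ (List.getElem_mem hi)
    rw [compat i j hi hjP]
    exact h i (by exact_mod_cast hx1) hib _
      (by rw [List.getD_eq_getElem _ '?' (by omega)]; exact List.getElem_mem _)

theorem isMono_eq (grid : List String) (r0 r1 c0 c1 : Int) :
    pvIsMono grid r0 r1 c0 c1 =
      if r0 < r1 ∧ c0 < c1 ∧ (∀ x, r0 ≤ x → x < r1 → ∀ y, c0 ≤ y → y < c1 →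
          pvCharAt grid x y = pvCharAt grid r0 c0)
      then some (pvCharAt grid r0 c0) else none := by
  unfold pvIsMono
  by_cases h1 : r0 ≥ r1 ∨ c0 ≥ c1
  · rw [if_pos h1, if_neg (by rintro ⟨ha, hb, -⟩; omega)]
  · rw [if_neg h1]
    rw [not_or] at h1
    have h1 : r0 < r1 ∧ c0 < c1 := ⟨by omega, by omega⟩
    by_cases h2 : ∀ x, r0 ≤ x → x < r1 → ∀ y, c0 ≤ y → y < c1 →
        pvCharAt grid x y = pvCharAt grid r0 c0
    · rw [if_pos ((allall_iff _ _ _ _ _ _).mpr h2), if_pos ⟨h1.1, h1.2, h2⟩]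
    · rw [if_neg (fun hc => h2 ((allall_iff _ _ _ _ _ _).mp hc)), if_neg (by tauto)]

theorem headD_take_drop (cs : List Char) (a kk : Nat) (ha : a < cs.length) (hk : 0 < kk) :
    ((cs.drop a).take kk).headD '?' = cs.getD a '?' := by
  rw [List.drop_eq_getElem_cons ha]
  cases kk with
  | zero => omega
  | succ j => rw [List.take_succ_cons]; simp [List.getElem?_eq_getElem ha]

theorem ball_take_drop (cs : List Char) (a kk : Nat) (hak : a + kk ≤ cs.length) (Q : Char → Prop) :
    (∀ ch ∈ (cs.drop a).take kk, Q ch) ↔ ∀ j, j < kk → Q (cs.getD (a+j) '?') := by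
  constructor
  · intro h j hj
    have hj' : a + j < cs.length := by omega
    rw [List.getD_eq_getElem _ _ hj']
    apply h
    rw [List.mem_iff_getElem]
    refine ⟨j, by simp; omega, ?_⟩
    rw [List.getElem_take, List.getElem_drop]
  · intro h ch hch
    obtain ⟨j, hj, rfl⟩ := List.mem_iff_getElem.mp hch
    have hjk : j < kk := by simp at hj; omega
    have := h j hjk
    rw [List.getD_eq_getElem _ _ (by omega)] at this
    rw [List.getElem_take, List.getElem_drop]
    exact this

theorem striped_some (cs : List Char) (k : Nat) (hcs : cs.length = 3*k) (hk : 0 < k) :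
    pvStriped (some cs) = true ↔
      ((∀ i : Nat, i < 3 → ∀ j, j < k → cs.getD (i*k + j) '?' = cs.getD (i*k) '?') ∧
       (PySem.Set.ofList [cs.getD 0 '?', cs.getD k '?', cs.getD (2*k) '?']).length = 3) := by
  have hmod : PySem.Int.mod ((cs.length : Nat) : Int) 3 = 0 := by
    rw [show ((3:Int)) = ((3:Nat):Int) from rfl, PySem.Int.mod_natCast]
    simp [hcs, Nat.mul_mod_right]
  have hdiv : PySem.Int.floordiv ((cs.length : Nat) : Int) 3 = (k : Int) := by
    rw [show ((3:Int)) = ((3:Nat):Int) from rfl, PySem.Int.floordiv_natCast]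
    simp [hcs, Nat.mul_div_cancel_left]
  have hrange : PySem.List.pyRange 0 3 1 = [0, 1, 2] := by decide
  have hguard : ¬(cs.length = 0 ∨ PySem.Int.mod ((cs.length : Nat) : Int) 3 ≠ 0) := by
    exact not_or.mpr ⟨by omega, fun h => h hmod⟩
  rw [pvStriped, if_neg hguard]
  simp only [hdiv, hrange, List.map_cons, List.map_nil]
  have hsl : ∀ i : Nat, i < 3 →
      PySem.List.slice cs (some ((i:Int) * (k:Int))) (some (((i:Int)+1) * (k:Int))) =
        (cs.drop (i*k)).take k := by
    intro i _
    have e1 : (i:Int) * (k:Int) = ((i*k : Nat) : Int) := by push_cast; ring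
    have e2 : ((i:Int)+1) * (k:Int) = (((i+1)*k : Nat) : Int) := by push_cast; ring
    rw [e1, e2, PySem.List.slice_natCast, Nat.succ_mul]
    congr 1
    omega
  have h0 : PySem.List.slice cs (some (0 * (k:Int))) (some ((0+1) * (k:Int))) = (cs.drop (0*k)).take k := by
    have := hsl 0 (by omega); exact_mod_cast this
  have h1 : PySem.List.slice cs (some (1 * (k:Int))) (some ((1+1) * (k:Int))) = (cs.drop (1*k)).take k := by
    have := hsl 1 (by omega); exact_mod_cast this
  have h2 : PySem.List.slice cs (some (2 * (k:Int))) (some ((2+1) * (k:Int))) = (cs.drop (2*k)).take k := by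
    have := hsl 2 (by omega); exact_mod_cast this
  rw [h0, h1, h2]
  have hrep : ∀ i : Nat, i < 3 →
      (PySem.List.pyGet? ((cs.drop (i*k)).take k) 0).getD '?' = cs.getD (i*k) '?' := by
    intro i hi
    have hik : i*k < cs.length := by
      rw [hcs]; exact (Nat.mul_lt_mul_right hk).mpr hi
    rw [pvGet0, headD_take_drop cs _ _ hik hk]
  have hb : ∀ i : Nat, i < 3 →
      ((((cs.drop (i*k)).take k).all
        (fun c => c == cs.getD (i*k) '?')) = true
      ↔ ∀ j, j < k → cs.getD (i*k + j) '?' = cs.getD (i*k) '?') := by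
    intro i hi
    rw [List.all_eq_true]
    simp only [beq_iff_eq]
    exact ball_take_drop cs (i*k) k (by rw [hcs]; calc i*k + k = (i+1)*k := by rw [Nat.succ_mul]
                                                  _ ≤ 3*k := Nat.mul_le_mul_right k hi) _
  simp only [List.all_cons, List.all_nil, List.map_cons, List.map_nil, Bool.and_eq_true,
    beq_iff_eq, and_true]
  rw [hrep 0 (by omega), hrep 1 (by omega), hrep 2 (by omega),
     hb 0 (by omega), hb 1 (by omega), hb 2 (by omega)]
  simp only [Nat.zero_mul, Nat.one_mul]
  constructor
  · rintro ⟨⟨a0, a1, a2⟩, hset⟩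
    refine ⟨?_, hset⟩
    intro i hi j hj
    interval_cases i
    · simpa using a0 j hj
    · simpa using a1 j hj
    · simpa using a2 j hj
  · rintro ⟨hall, hset⟩
    refine ⟨⟨?_, ?_, ?_⟩, hset⟩
    · intro j hj; simpa using hall 0 (by omega) j hj
    · intro j hj; simpa using hall 1 (by omega) j hj
    · intro j hj; simpa using hall 2 (by omega) j hj

theorem getD_lines (lines : List (List Char)) (i : Nat) (hi : i < lines.length) :
    lines.getD i [] = lines[i] := List.getD_eq_getElem lines [] hi

theorem SC_uniform (lines : List (List Char)) (P : Nat)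
    (hlenP : ∀ l ∈ lines, l.length = P) (hP : 0 < P)
    (a b : Nat) (col : Char) (hb : b ≤ lines.length) (h : pvSC lines a b col) :
    ∀ i, a ≤ i → i < b →
      lines.getD i [] ≠ [] ∧ ∀ ch ∈ lines.getD i [], ch = (lines.getD i []).headD '?' := by
  intro i ha hib
  have hi := lt_of_lt_of_le hib hb
  have hlen : (lines.getD i []).length = P := by
    rw [getD_lines lines i hi]; exact hlenP _ (List.getElem_mem hi)
  have hne : lines.getD i [] ≠ [] := by
    intro he; rw [he] at hlen; simp at hlen; omega
  have hhd : (lines.getD i []).headD '?' = col := h i ha hib _ (headD_mem _ hne)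
  exact ⟨hne, fun ch hch => by rw [h i ha hib ch hch, hhd]⟩

theorem striped_iff (lines : List (List Char)) (P k : Nat)
    (hlenP : ∀ l ∈ lines, l.length = P) (hL : lines.length = 3*k) (hk : 0 < k) (hP : 0 < P) :
    pvStriped (pvLineColors lines) = true ↔
      pvSC lines 0 k (pvHd lines 0) ∧ pvSC lines k (2*k) (pvHd lines k) ∧
      pvSC lines (2*k) (3*k) (pvHd lines (2*k)) ∧
      (PySem.Set.ofList [pvHd lines 0, pvHd lines k, pvHd lines (2*k)]).length = 3 := by
  have hnonempty : ∀ i, i < lines.length → lines.getD i [] ≠ [] := by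
    intro i hi he
    have hlen : (lines.getD i []).length = P := by
      rw [getD_lines lines i hi]; exact hlenP _ (List.getElem_mem hi)
    rw [he] at hlen; simp at hlen; omega
  by_cases huni : ∀ l ∈ lines, l ≠ [] ∧ ∀ ch ∈ l, ch = l.headD '?'
  · rw [lineColors_eq, if_pos huni]
    have hcslen : (lines.map (fun l => l.headD '?')).length = 3*k := by simp [hL]
    rw [striped_some _ k hcslen hk]
    have csD : ∀ i, i < 3*k → (lines.map (fun l => l.headD '?')).getD i '?' = pvHd lines i := by
      intro i hi
      rw [List.getD_eq_getElem _ _ (by simp [hL]; omega), List.getElem_map, pvHd,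
        getD_lines lines i (by omega)]
    have stripe_iff : ∀ a : Nat, a + k ≤ 3*k →
        ((∀ j, j < k → pvHd lines (a+j) = pvHd lines a) ↔ pvSC lines a (a+k) (pvHd lines a)) := by
      intro a hak
      constructor
      · intro h i hai hib ch hch
        have hi : i < lines.length := by omega
        have hmem : lines.getD i [] ∈ lines := by
          rw [getD_lines lines i hi]; exact List.getElem_mem hi
        have hu := huni _ hmem
        have : ch = (lines.getD i []).headD '?' := hu.2 ch hch
        rw [this]
        have : (lines.getD i []).headD '?' = pvHd lines (a + (i - a)) := by
          rw [show a + (i - a) = i from by omega]; rfl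
        rw [this, h (i-a) (by omega)]
      · intro h j hj
        have hi : a + j < lines.length := by omega
        have hhd : pvHd lines (a+j) ∈ lines.getD (a+j) [] :=
          headD_mem _ (hnonempty _ hi)
        exact h (a+j) (by omega) (by omega) _ hhd
    constructor
    · rintro ⟨hblocks, hset⟩
      have s0 := (stripe_iff 0 (by omega)).mp (by
        intro j hj
        have := hblocks 0 (by omega) j hj
        rw [csD _ (by omega), csD _ (by omega)] at this
        simpa using this)
      have s1 := (stripe_iff k (by omega)).mp (by
        intro j hj
        have := hblocks 1 (by omega) j hj
        rw [csD _ (by omega), csD _ (by omega)] at this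
        simpa using this)
      have s2 := (stripe_iff (2*k) (by omega)).mp (by
        intro j hj
        have := hblocks 2 (by omega) j hj
        rw [csD _ (by omega), csD _ (by omega)] at this
        simpa using this)
      rw [csD 0 (by omega), csD k (by omega), csD (2*k) (by omega)] at hset
      refine ⟨by simpa using s0, ?_, ?_, hset⟩
      · have : k + k = 2*k := by omega
        rw [← this]; exact s1
      · have : 2*k + k = 3*k := by omega
        rw [← this]; exact s2
    · rintro ⟨s0, s1, s2, hset⟩
      constructor
      · intro i hi j hj
        rw [csD _ (by nlinarith), csD _ (by nlinarith)]
        interval_cases i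
        · have h' := (stripe_iff 0 (by omega)).mpr (by simpa using s0) j hj
          simpa using h'
        · have h' := (stripe_iff k (by omega)).mpr (by
            have e : k + k = 2*k := by omega
            rw [e]; exact s1) j hj
          simpa using h'
        · have h' := (stripe_iff (2*k) (by omega)).mpr (by
            have e : 2*k + k = 3*k := by omega
            rw [e]; exact s2) j hj
          simpa using h'
      · rw [csD 0 (by omega), csD k (by omega), csD (2*k) (by omega)]
        exact hset
  · rw [lineColors_eq, if_neg huni]
    simp only [pvStriped, Bool.false_eq_true, false_iff]
    rintro ⟨s0, s1, s2, -⟩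
    apply huni
    intro l hl
    obtain ⟨i, hi, rfl⟩ := List.mem_iff_getElem.mp hl
    rw [← getD_lines lines i hi]
    rcases Nat.lt_or_ge i k with h|h
    · exact SC_uniform lines P hlenP hP 0 k _ (by omega) s0 i (by omega) h
    · rcases Nat.lt_or_ge i (2*k) with h2|h2
      · exact SC_uniform lines P hlenP hP k (2*k) _ (by omega) s1 i h h2
      · exact SC_uniform lines P hlenP hP (2*k) (3*k) _ (by omega) s2 i h2 (by omega)

theorem getD_zero_headD (l : List Char) : l.getD 0 '?' = l.headD '?' := by
  cases l <;> simp

theorem compat_rows (grid : List String) (i j : Nat) (hi : i < grid.length) :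
    pvCharAt grid ↑i ↑j = ((grid.map String.toList).getD i []).getD j '?' := by
  have h1 : PySem.List.pyGet? grid (i:Int) = some grid[i] := by
    simp [List.getElem?_eq_getElem hi]
  rw [pvCharAt, h1]
  have h2 : (grid.map String.toList).getD i [] = grid[i].toList := by
    rw [List.getD_eq_getElem _ [] (by simpa), List.getElem_map]
  rw [h2]
  simp [List.getD]

theorem compat_cols (grid : List String) (P c r : Nat) (hc : c < P) (hr : r < grid.length) :
    pvCharAt grid ↑r ↑c =
      ((((PySem.List.pyRange 0 (P:Int) 1).map
          (fun j => grid.map (fun row => (PySem.Str.pyGet? row j).getD '?'))).getD c []).getD r '?') := by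
  have hcol : ((PySem.List.pyRange 0 (P:Int) 1).map
      (fun j => grid.map (fun row => (PySem.Str.pyGet? row j).getD '?'))).getD c [] =
      grid.map (fun row => (PySem.Str.pyGet? row (c:Int)).getD '?') := by
    rw [← PySem.List.pyGetD_natCast]
    exact PySem.List.pyGetD_map_pyRange _ P c _ hc
  rw [hcol, List.getD_eq_getElem _ '?' (by simpa), List.getElem_map]
  have h1 : PySem.List.pyGet? grid (r:Int) = some grid[r] := by
    simp [List.getElem?_eq_getElem hr]
  rw [pvCharAt, h1]

theorem mono_h (grid : List String) (P : Nat) (hlen : ∀ s ∈ grid, s.toList.length = P)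
    (a b : Nat) (hab : a < b) (hb : b ≤ grid.length) (hP : 0 < P) :
    (pvSC (grid.map String.toList) a b (pvHd (grid.map String.toList) a) →
      pvIsMono grid ((a:Nat):Int) ((b:Nat):Int) 0 ((P:Nat):Int) =
        some (pvHd (grid.map String.toList) a)) ∧
    (¬ pvSC (grid.map String.toList) a b (pvHd (grid.map String.toList) a) →
      pvIsMono grid ((a:Nat):Int) ((b:Nat):Int) 0 ((P:Nat):Int) = none) := by
  have hlenP : ∀ l ∈ grid.map String.toList, l.length = P := by
    intro l hl
    obtain ⟨s, hs, rfl⟩ := List.mem_map.mp hl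
    exact hlen s hs
  have hca : pvCharAt grid ((a:Nat):Int) 0 = pvHd (grid.map String.toList) a := by
    have := compat_rows grid a 0 (by omega)
    rw [Nat.cast_zero] at this
    rw [this, getD_zero_headD, pvHd]
  have hq := intq_iff_SC (grid.map String.toList) P hlenP a b
    (by simpa using hb) (fun x y => pvCharAt grid x y)
    (fun i j hi hj => compat_rows grid i j (by simpa using hi))
    (pvHd (grid.map String.toList) a)
  rw [isMono_eq, hca]
  constructor
  · intro hS
    rw [if_pos ⟨by exact_mod_cast hab, by exact_mod_cast hP, hq.mpr hS⟩]
  · intro hS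
    rw [if_neg (fun hc => hS (hq.mp hc.2.2))]

theorem length_pvCols (grid : List String) (P : Nat) : (pvCols grid P).length = P := by
  simp [pvCols, PySem.List.length_pyRange_one]

theorem mono_v (grid : List String) (P L : Nat) (hlen : ∀ s ∈ grid, s.toList.length = P)
    (hgl : grid.length = L) (hL : 0 < L)
    (a b : Nat) (hab : a < b) (hb : b ≤ P) :
    (pvSC (pvCols grid P) a b (pvHd (pvCols grid P) a) →
      pvIsMono grid 0 ((L:Nat):Int) ((a:Nat):Int) ((b:Nat):Int) =
        some (pvHd (pvCols grid P) a)) ∧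
    (¬ pvSC (pvCols grid P) a b (pvHd (pvCols grid P) a) →
      pvIsMono grid 0 ((L:Nat):Int) ((a:Nat):Int) ((b:Nat):Int) = none) := by
  have hlencols : ∀ l ∈ pvCols grid P, l.length = L := by
    intro l hl
    obtain ⟨j, hj, rfl⟩ := List.mem_map.mp hl
    simp [hgl]
  have hca : pvCharAt grid 0 ((a:Nat):Int) = pvHd (pvCols grid P) a := by
    have := compat_cols grid P a 0 (by omega) (by omega)
    rw [Nat.cast_zero] at this
    rw [this, getD_zero_headD, pvHd, pvCols]
  have hq := intq_iff_SC (pvCols grid P) L hlencols a b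
    (by rw [length_pvCols]; exact hb) (fun x y => pvCharAt grid y x)
    (fun i j hi hj => compat_cols grid P i j (by rwa [length_pvCols] at hi) (by omega))
    (pvHd (pvCols grid P) a)
  have hswap : (∀ x, (0:Int) ≤ x → x < ((L:Nat):Int) → ∀ y, ((a:Nat):Int) ≤ y → y < ((b:Nat):Int) →
      pvCharAt grid x y = pvCharAt grid 0 ((a:Nat):Int)) ↔
      (∀ x, ((a:Nat):Int) ≤ x → x < ((b:Nat):Int) → ∀ y, (0:Int) ≤ y → y < ((L:Nat):Int) →
      pvCharAt grid y x = pvCharAt grid 0 ((a:Nat):Int)) := by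
    constructor
    · intro h x hx1 hx2 y hy1 hy2; exact h y hy1 hy2 x hx1 hx2
    · intro h x hx1 hx2 y hy1 hy2; exact h y hy1 hy2 x hx1 hx2
  rw [isMono_eq, hca]
  rw [hca] at hswap
  constructor
  · intro hS
    rw [if_pos ⟨by exact_mod_cast hL, by exact_mod_cast hab, hswap.mpr (hq.mpr hS)⟩]
  · intro hS
    rw [if_neg (fun hc => hS (hq.mp (hswap.mp hc.2.2)))]

theorem horiz_eq (grid : List String) (P H : Nat) (hH : 0 < H) (hP : 0 < P)
    (hlen : ∀ s ∈ grid, s.toList.length = P) (hL : grid.length = 3*H) :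
    (match pvCollect grid [((0:Int), ((H:Nat):Int), 0, ((P:Nat):Int)),
        (((H:Nat):Int), 2*((H:Nat):Int), 0, ((P:Nat):Int)),
        (2*((H:Nat):Int), ((3*H:Nat):Int), 0, ((P:Nat):Int))] with
      | some colors => ((PySem.Set.ofList colors).length == 3 : Bool)
      | none => false) = pvStriped (pvLineColors (grid.map String.toList)) := by
  have hlenP : ∀ l ∈ grid.map String.toList, l.length = P := by
    intro l hl
    obtain ⟨s, hs, rfl⟩ := List.mem_map.mp hl
    exact hlen s hs
  have hLr : (grid.map String.toList).length = 3*H := by simp [hL]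
  have hsi := striped_iff (grid.map String.toList) P H hlenP hLr hH hP
  have m1 := mono_h grid P hlen 0 H hH (by omega) hP
  have m2 := mono_h grid P hlen H (2*H) (by omega) (by omega) hP
  have m3 := mono_h grid P hlen (2*H) (3*H) (by omega) (by omega) hP
  rw [Nat.cast_zero] at m1
  rw [show ((2*H:Nat):Int) = 2*((H:Nat):Int) from by push_cast; ring] at m2 m3
  set rows := grid.map String.toList with hrows
  by_cases h1 : pvSC rows 0 H (pvHd rows 0)
  · by_cases h2 : pvSC rows H (2*H) (pvHd rows H)
    · by_cases h3 : pvSC rows (2*H) (3*H) (pvHd rows (2*H))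
      · rw [pvCollect, m1.1 h1, pvCollect, m2.1 h2, pvCollect, m3.1 h3, pvCollect]
        simp only [Option.map_some, Option.map_none]
        rcases hset : (PySem.Set.ofList [pvHd rows 0, pvHd rows H, pvHd rows (2*H)]).length == 3 with hf | ht
        · have : ¬ (pvStriped (pvLineColors rows) = true) := by
            intro ht
            have := (hsi.mp ht).2.2.2
            rw [← beq_iff_eq (a := (PySem.Set.ofList [pvHd rows 0, pvHd rows H, pvHd rows (2*H)]).length) (b := 3)] at this
            rw [hset] at this; exact Bool.false_ne_true this
          simp [Bool.not_eq_true] at this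
          rw [this]
        · have : pvStriped (pvLineColors rows) = true :=
            hsi.mpr ⟨h1, h2, h3, by rwa [← beq_iff_eq (a := (PySem.Set.ofList [pvHd rows 0, pvHd rows H, pvHd rows (2*H)]).length) (b := 3)]⟩
          rw [this]
      · rw [pvCollect, m1.1 h1, pvCollect, m2.1 h2, pvCollect, m3.2 h3]
        dsimp only
        have : ¬ (pvStriped (pvLineColors rows) = true) := fun ht => h3 (hsi.mp ht).2.2.1
        simp [Bool.not_eq_true] at this
        rw [this]
        simp
    · rw [pvCollect, m1.1 h1, pvCollect, m2.2 h2]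
      dsimp only
      have : ¬ (pvStriped (pvLineColors rows) = true) := fun ht => h2 (hsi.mp ht).2.1
      simp [Bool.not_eq_true] at this
      rw [this]
      simp
  · rw [pvCollect, m1.2 h1]
    dsimp only
    have : ¬ (pvStriped (pvLineColors rows) = true) := fun ht => h1 (hsi.mp ht).1
    simp [Bool.not_eq_true] at this
    rw [this]

theorem vert_eq (grid : List String) (P W L : Nat) (hW : 0 < W) (hL0 : 0 < L)
    (hlen : ∀ s ∈ grid, s.toList.length = P) (hgl : grid.length = L) (hPW : P = 3*W) :
    (match pvCollect grid [((0:Int), ((L:Nat):Int), 0, ((W:Nat):Int)),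
        (0, ((L:Nat):Int), ((W:Nat):Int), 2*((W:Nat):Int)),
        (0, ((L:Nat):Int), 2*((W:Nat):Int), ((3*W:Nat):Int))] with
      | some colors => ((PySem.Set.ofList colors).length == 3 : Bool)
      | none => false) = pvStriped (pvLineColors (pvCols grid P)) := by
  have hlencols : ∀ l ∈ pvCols grid P, l.length = L := by
    intro l hl
    obtain ⟨j, hj, rfl⟩ := List.mem_map.mp hl
    simp [hgl]
  have hLc : (pvCols grid P).length = 3*W := by rw [length_pvCols]; omega
  have hsi := striped_iff (pvCols grid P) L W hlencols hLc hW hL0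
  have m1 := mono_v grid P L hlen hgl hL0 0 W hW (by omega)
  have m2 := mono_v grid P L hlen hgl hL0 W (2*W) (by omega) (by omega)
  have m3 := mono_v grid P L hlen hgl hL0 (2*W) (3*W) (by omega) (by omega)
  rw [Nat.cast_zero] at m1
  rw [show ((2*W:Nat):Int) = 2*((W:Nat):Int) from by push_cast; ring] at m2 m3
  set cols := pvCols grid P with hcols
  by_cases h1 : pvSC cols 0 W (pvHd cols 0)
  · by_cases h2 : pvSC cols W (2*W) (pvHd cols W)
    · by_cases h3 : pvSC cols (2*W) (3*W) (pvHd cols (2*W))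
      · rw [pvCollect, m1.1 h1, pvCollect, m2.1 h2, pvCollect, m3.1 h3, pvCollect]
        simp only [Option.map_some]
        rcases hset : (PySem.Set.ofList [pvHd cols 0, pvHd cols W, pvHd cols (2*W)]).length == 3 with hf | ht
        · have : ¬ (pvStriped (pvLineColors cols) = true) := by
            intro ht
            have := (hsi.mp ht).2.2.2
            rw [← beq_iff_eq (a := (PySem.Set.ofList [pvHd cols 0, pvHd cols W, pvHd cols (2*W)]).length) (b := 3)] at this
            rw [hset] at this; exact Bool.false_ne_true this
          simp [Bool.not_eq_true] at this
          rw [this]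
        · have : pvStriped (pvLineColors cols) = true :=
            hsi.mpr ⟨h1, h2, h3, by rwa [← beq_iff_eq (a := (PySem.Set.ofList [pvHd cols 0, pvHd cols W, pvHd cols (2*W)]).length) (b := 3)]⟩
          rw [this]
      · rw [pvCollect, m1.1 h1, pvCollect, m2.1 h2, pvCollect, m3.2 h3]
        dsimp only
        have : ¬ (pvStriped (pvLineColors cols) = true) := fun ht => h3 (hsi.mp ht).2.2.1
        simp [Bool.not_eq_true] at this
        rw [this]
        simp
    · rw [pvCollect, m1.1 h1, pvCollect, m2.2 h2]
      dsimp only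
      have : ¬ (pvStriped (pvLineColors cols) = true) := fun ht => h2 (hsi.mp ht).2.1
      simp [Bool.not_eq_true] at this
      rw [this]
      simp
  · rw [pvCollect, m1.2 h1]
    dsimp only
    have : ¬ (pvStriped (pvLineColors cols) = true) := fun ht => h1 (hsi.mp ht).1
    simp [Bool.not_eq_true] at this
    rw [this]

theorem solve_empty (m : Int) : solve 0 m [] = "NO" := by
  simp only [solve]
  have h1 : ∀ a b : Int, pvIsMono [] 0 0 a b = none := fun a b => by
    rw [pvIsMono, if_pos (Or.inl le_rfl)]
  have hf : PySem.Int.floordiv 0 3 = 0 := by decide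
  rw [hf]
  simp [pvCollect, h1]

theorem solve_alt_empty (m : Int) : solve_alt 0 m [] = "NO" := by
  have hstr : pvStriped (pvLineColors
      ((PySem.List.pyRange 0 m 1).map
        (fun j => ([] : List String).map (fun row => (PySem.Str.pyGet? row j).getD '?')))) = false := by
    by_cases h : m ≤ 0
    · rw [PySem.List.pyRange_one_eq_nil h]; decide
    · rw [PySem.List.pyRange_one_cons (by omega)]
      simp only [List.map_cons, List.map_nil]
      rw [pvLineColors]
      rw [if_pos (by decide)]
      rfl
  simp only [solve_alt]
  rw [if_neg (by rintro ⟨-, hs⟩; simp only [List.map_nil, show pvLineColors [] = some [] from rfl] at hs; exact absurd hs (by decide))]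
  split_ifs with h2 h3
  · rw [hstr] at h3; exact absurd h3 (by decide)
  · rfl
  · rfl

theorem vert_both (grid : List String) (P L : Nat)
    (hlen : ∀ s ∈ grid, s.toList.length = P) (hgl : grid.length = L) (hL0 : 0 < L) :
    (if (if PySem.Int.mod ((P:Nat):Int) 3 = 0 then
          (match pvCollect grid [(0, ((L:Nat):Int), 0, PySem.Int.floordiv ((P:Nat):Int) 3),
              (0, ((L:Nat):Int), PySem.Int.floordiv ((P:Nat):Int) 3, 2*PySem.Int.floordiv ((P:Nat):Int) 3),
              (0, ((L:Nat):Int), 2*PySem.Int.floordiv ((P:Nat):Int) 3, ((P:Nat):Int))] with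
            | some colors => ((PySem.Set.ofList colors).length == 3 : Bool)
            | none => false)
        else false) = true then "YES" else "NO")
    = (if PySem.Int.mod ((P:Nat):Int) 3 = 0 then
        (if pvStriped (pvLineColors ((PySem.List.pyRange 0 ((P:Nat):Int) 1).map
            (fun j => grid.map (fun row => (PySem.Str.pyGet? row j).getD '?')))) = true
         then "YES" else "NO")
       else "NO") := by
  by_cases hm3 : PySem.Int.mod ((P:Nat):Int) 3 = 0
  · have hdvd : 3 ∣ P := by
      have := (PySem.Int.mod_eq_zero_iff_dvd _ _).mp hm3
      exact_mod_cast this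
    have hW : P = 3 * (P / 3) := by omega
    have hfd : PySem.Int.floordiv ((P:Nat):Int) 3 = ((P/3 : Nat) : Int) := by
      rw [show ((3:Int)) = ((3:Nat):Int) from rfl, PySem.Int.floordiv_natCast]
    rw [if_pos hm3, if_pos hm3, hfd]
    by_cases hW0 : P / 3 = 0
    · have hP0 : P = 0 := by omega
      subst hP0
      simp only [Nat.zero_div, Nat.cast_zero]
      have hmono : pvIsMono grid 0 ((L:Nat):Int) 0 0 = none := by
        rw [pvIsMono, if_pos (Or.inr le_rfl)]
      rw [pvCollect, hmono]
      dsimp only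
      rw [PySem.List.pyRange_one_eq_nil le_rfl, List.map_nil]
      rw [show pvLineColors [] = some [] from rfl]
      have : pvStriped (some []) = false := by decide
      rw [this]
    · have hWpos : 0 < P / 3 := by omega
      have hveq := vert_eq grid P (P/3) L hWpos hL0 hlen hgl (by omega)
      rw [show ((3*(P/3) : Nat) : Int) = ((P:Nat):Int) from by rw [← hW]] at hveq
      rw [hveq]
      rfl
  · rw [if_neg hm3, if_neg hm3]
    simp

theorem solve_equiv (n m : Int) (grid : List String)
    (hn : ((grid.length : Nat) : Int) = n) (hm : ∀ s ∈ grid, PySem.Str.len s = m) :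
    solve n m grid = solve_alt n m grid := by
  rcases grid with _ | ⟨s0, rest⟩
  · have h0 : n = 0 := by simpa using hn.symm
    subst h0
    rw [solve_empty, solve_alt_empty]
  · have hmP : m = ((s0.toList.length : Nat) : Int) := by
      have := hm s0 (by simp)
      rw [PySem.Str.len_eq] at this
      omega
    have hL0 : 0 < (s0 :: rest).length := by simp
    subst hmP
    rw [← hn]
    set grid := s0 :: rest with hgrid
    set L := grid.length with hLdef
    set P := s0.toList.length with hPdef
    have hlen : ∀ s ∈ grid, s.toList.length = P := by
      intro s hs
      have := hm s hs
      rw [PySem.Str.len_eq] at this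
      exact_mod_cast this
    simp only [solve, solve_alt]
    by_cases hn3 : PySem.Int.mod ((L:Nat):Int) 3 = 0
    · have hdvd : 3 ∣ L := by
        have := (PySem.Int.mod_eq_zero_iff_dvd _ _).mp hn3
        exact_mod_cast this
      have hH : L = 3 * (L / 3) := by omega
      have hH0 : 0 < L / 3 := by omega
      have hfdL : PySem.Int.floordiv ((L:Nat):Int) 3 = ((L/3 : Nat) : Int) := by
        rw [show ((3:Int)) = ((3:Nat):Int) from rfl, PySem.Int.floordiv_natCast]
      rw [if_pos hn3, hfdL]
      by_cases hP0 : P = 0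
      · have hrow0 : s0.toList = [] := by
          rw [← List.length_eq_zero_iff]; omega
        have hm1 : pvIsMono grid 0 ((L/3 : Nat):Int) 0 ((P:Nat):Int) = none := by
          rw [pvIsMono, if_pos (Or.inr (by simp [hP0]))]
        rw [pvCollect, hm1]
        have halt : pvStriped (pvLineColors (grid.map String.toList)) = false := by
          rw [hgrid, List.map_cons, hrow0, pvLineColors, if_pos (by decide)]
          rfl
        have hng : ¬(PySem.Int.mod ((L:Nat):Int) 3 = 0 ∧
            pvStriped (pvLineColors (grid.map String.toList)) = true) := by
          rintro ⟨-, hs⟩; rw [halt] at hs; exact Bool.false_ne_true hs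
        rw [if_neg hng]
        exact vert_both grid P L hlen rfl hL0
      · have hheq := horiz_eq grid P (L/3) hH0 (by omega) hlen (by omega)
        rw [show ((L:Nat):Int) = ((3*(L/3) : Nat):Int) from by rw [← hH]]
        rw [hheq]
        have hn3' : PySem.Int.mod ((3*(L/3) : Nat):Int) 3 = 0 := by
          rw [← hH]; exact hn3
        by_cases hB1 : pvStriped (pvLineColors (grid.map String.toList)) = true
        · rw [hB1, if_pos (And.intro hn3' rfl), if_pos rfl]
        · rw [Bool.not_eq_true] at hB1
          have hng : ¬(PySem.Int.mod ((3*(L/3) : Nat):Int) 3 = 0 ∧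
              pvStriped (pvLineColors (grid.map String.toList)) = true) := by
            rintro ⟨-, hs⟩; rw [hB1] at hs; exact Bool.false_ne_true hs
          rw [if_neg hng, hB1]
          simp only [Bool.false_eq_true, if_false]
          exact vert_both grid P (3*(L/3)) hlen (by omega) (by omega)
    · rw [if_neg hn3]
      have hng : ¬(PySem.Int.mod ((L:Nat):Int) 3 = 0 ∧
          pvStriped (pvLineColors (grid.map String.toList)) = true) := by
        rintro ⟨hs, -⟩; exact hn3 hs
      rw [if_neg hng]
      exact vert_both grid P L hlen rfl hL0

-- ===== VERDICT (by name: the statement is the Claim_ definition above) =====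
theorem solve_nomod (n m : Int) (grid : List String)
    (h1 : PySem.Int.mod n 3 ≠ 0) (h2 : PySem.Int.mod m 3 ≠ 0) :
    solve n m grid = solve_alt n m grid := by
  simp only [solve, solve_alt]
  have hngB : ¬(PySem.Int.mod n 3 = 0 ∧
      pvStriped (pvLineColors (grid.map String.toList)) = true) := by
    rintro ⟨hs, -⟩; exact h1 hs
  rw [if_neg h1, if_neg h2, if_neg hngB, if_neg h2]
  simp

theorem solve_spec : Claim_equal_solve := by
  intro n m grid _ hp
  unfold Spec_solve
  rcases hp with ⟨hn, hm⟩ | ⟨h1, h2⟩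
  · exact solve_equiv n m grid hn hm
  · exact solve_nomod n m grid h1 h2
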